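-- pv_equiv track=rewrite | github.com/mxs3203/MachineLearning2018 | handin3/handin3_v3.py | count_cr
-- ===== SOURCE A (Python) =====
-- def count_cr(true, pred):
--     total = tp = fp = tn = fn = 0
--     for i in range(len(true)):
--         if pred[i] == 'C' or pred[i] == 'c' or pred[i] == 'R' or pred[i] == 'r':
--             total = total + 1
--             if (pred[i] == 'C' or pred[i] == 'c') and (true[i] == 'C' or true[i] == 'c'):
--                 tp = tp + 1
--             elif (pred[i] == 'R' or pred[i] == 'r') and (true[i] == 'R' or true[i] == 'r'):
--                 tp = tp + 1
--             else:
--                 fp = fp + 1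
--         if pred[i] == 'N' or pred[i] == 'n':
--             if true[i] == 'N' or true[i] == 'n':
--                 tn = tn + 1
--             else:
--                 fn = fn + 1
--     return (total, tp, fp, tn, fn)
-- ===== SOURCE B (Python) =====
-- def count_cr(true, pred):
--     n = len(true)
--     total = sum(1 for i in range(n) if pred[i] in ('C', 'c', 'R', 'r'))
--     tp = sum(1 for i in range(n)
--              if (pred[i] in ('C', 'c') and true[i] in ('C', 'c'))
--              or (pred[i] in ('R', 'r') and true[i] in ('R', 'r')))
--     fp = total - tp
--     tn = sum(1 for i in range(n) if pred[i] in ('N', 'n') and true[i] in ('N', 'n'))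
--     fn = sum(1 for i in range(n) if pred[i] in ('N', 'n') and true[i] not in ('N', 'n'))
--     return (total, tp, fp, tn, fn)
-- ===== Notes on version B (the rewrite author's own statement) =====
-- stated objective: simpler
-- what changed: One interleaved stateful loop with nested if/elif branches is replaced by independent one-condition counting passes, with fp derived arithmetically as total - tp instead of an else branch.
import Mathlib
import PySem

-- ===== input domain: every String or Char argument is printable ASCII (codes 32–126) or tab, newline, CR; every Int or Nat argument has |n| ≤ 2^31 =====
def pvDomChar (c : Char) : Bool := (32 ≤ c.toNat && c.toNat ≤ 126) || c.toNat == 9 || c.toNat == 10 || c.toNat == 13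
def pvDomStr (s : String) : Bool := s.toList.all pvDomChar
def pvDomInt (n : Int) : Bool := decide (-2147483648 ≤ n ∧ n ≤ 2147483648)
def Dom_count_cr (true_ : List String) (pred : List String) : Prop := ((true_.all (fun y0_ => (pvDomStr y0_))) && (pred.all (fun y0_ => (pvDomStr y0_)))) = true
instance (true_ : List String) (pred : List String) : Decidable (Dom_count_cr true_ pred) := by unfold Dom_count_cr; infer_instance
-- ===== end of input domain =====

-- B replaces A's single stateful loop with nested branches by independent single-condition
-- counting passes, deriving fp = total - tp arithmetically (objective: simpler).

-- ===== PORT A =====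
-- the loop body of A: one step of the interleaved for-loop, updating all five counters
def count_cr_step (gp gt : Int → String) (s : Int × Int × Int × Int × Int) (i : Int) :
    Int × Int × Int × Int × Int :=
  match s with
  | (total, tp, fp, tn, fn) =>
    let p := gp i
    let t := gt i
    let (total, tp, fp) :=
      if p = "C" ∨ p = "c" ∨ p = "R" ∨ p = "r" then
        if (p = "C" ∨ p = "c") ∧ (t = "C" ∨ t = "c") then (total + 1, tp + 1, fp)
        else if (p = "R" ∨ p = "r") ∧ (t = "R" ∨ t = "r") then (total + 1, tp + 1, fp)
        else (total + 1, tp, fp + 1)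
      else (total, tp, fp)
    let (tn, fn) :=
      if p = "N" ∨ p = "n" then
        if t = "N" ∨ t = "n" then (tn + 1, fn) else (tn, fn + 1)
      else (tn, fn)
    (total, tp, fp, tn, fn)

-- one interleaved loop over range(len(true)), mutating (total, tp, fp, tn, fn)
def count_cr (true_ : List String) (pred : List String) : Int × Int × Int × Int × Int :=
  (PySem.List.pyRange 0 true_.length 1).foldl
    (count_cr_step (fun i => PySem.List.pyGetD pred i "") (fun i => PySem.List.pyGetD true_ i ""))
    (0, 0, 0, 0, 0)

-- ===== PORT B =====
-- each counter is its own counting pass; fp is derived as total - tp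
def count_cr_alt (true_ : List String) (pred : List String) : Int × Int × Int × Int × Int :=
  let n : Int := true_.length
  let idx := PySem.List.pyRange 0 n 1
  let gp := fun i => PySem.List.pyGetD pred i ""
  let gt := fun i => PySem.List.pyGetD true_ i ""
  let total : Int := (idx.countP (fun i => gp i = "C" ∨ gp i = "c" ∨ gp i = "R" ∨ gp i = "r") : Nat)
  let tp : Int := (idx.countP (fun i =>
      ((gp i = "C" ∨ gp i = "c") ∧ (gt i = "C" ∨ gt i = "c")) ∨
      ((gp i = "R" ∨ gp i = "r") ∧ (gt i = "R" ∨ gt i = "r"))) : Nat)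
  let fp : Int := total - tp
  let tn : Int := (idx.countP (fun i => (gp i = "N" ∨ gp i = "n") ∧ (gt i = "N" ∨ gt i = "n")) : Nat)
  let fn : Int := (idx.countP (fun i => (gp i = "N" ∨ gp i = "n") ∧ ¬(gt i = "N" ∨ gt i = "n")) : Nat)
  (total, tp, fp, tn, fn)

-- ===== PRECONDITION & SPEC =====
-- A raises IndexError (and so does B) when pred is shorter than true_; exactly those inputs are excluded.
def Pre_count_cr (true_ : List String) (pred : List String) : Prop := true_.length ≤ pred.length
instance (true_ : List String) (pred : List String) : Decidable (Pre_count_cr true_ pred) := by unfold Pre_count_cr; infer_instance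
def pvWitness_count_cr : List String × List String := (["C", "n", "R"], ["c", "N", "x"])
def Spec_count_cr (true_ : List String) (pred : List String) (out : Int × Int × Int × Int × Int) : Prop := out = count_cr_alt true_ pred
instance (true_ : List String) (pred : List String) (out : Int × Int × Int × Int × Int) : Decidable (Spec_count_cr true_ pred out) := by unfold Spec_count_cr; infer_instance

-- ===== CLAIM (what is proved, stated in full; the proofs are below) =====
def Claim_equal_count_cr : Prop := ∀ (true_ : List String) (pred : List String), Dom_count_cr true_ pred → Pre_count_cr true_ pred → Spec_count_cr true_ pred (count_cr true_ pred)

-- ===== LEMMAS AND PROOFS =====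

-- one step of A's loop, written with the if-contributions of each counter made explicit
set_option maxHeartbeats 2000000 in
theorem count_cr_step_eq (gp gt : Int → String) (a b c d e : Int) (i : Int) :
    count_cr_step gp gt (a, b, c, d, e) i =
    ( a + (if gp i = "C" ∨ gp i = "c" ∨ gp i = "R" ∨ gp i = "r" then 1 else 0),
      b + (if ((gp i = "C" ∨ gp i = "c") ∧ (gt i = "C" ∨ gt i = "c")) ∨
              ((gp i = "R" ∨ gp i = "r") ∧ (gt i = "R" ∨ gt i = "r")) then 1 else 0),
      c + (if (gp i = "C" ∨ gp i = "c" ∨ gp i = "R" ∨ gp i = "r") ∧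
              ¬(((gp i = "C" ∨ gp i = "c") ∧ (gt i = "C" ∨ gt i = "c")) ∨
                ((gp i = "R" ∨ gp i = "r") ∧ (gt i = "R" ∨ gt i = "r"))) then 1 else 0),
      d + (if (gp i = "N" ∨ gp i = "n") ∧ (gt i = "N" ∨ gt i = "n") then 1 else 0),
      e + (if (gp i = "N" ∨ gp i = "n") ∧ ¬(gt i = "N" ∨ gt i = "n") then 1 else 0)) := by
  simp only [count_cr_step]
  split_ifs <;> simp_all <;> first | omega | tauto

-- the five counters of A's fold, expressed as independent counts over the index list
set_option maxHeartbeats 1000000 in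
theorem count_cr_fold_eq (gp gt : Int → String) (l : List Int) (a b c d e : Int) :
    l.foldl (count_cr_step gp gt) (a, b, c, d, e)
    = (a + (l.countP (fun i => gp i = "C" ∨ gp i = "c" ∨ gp i = "R" ∨ gp i = "r") : Nat),
       b + (l.countP (fun i =>
            ((gp i = "C" ∨ gp i = "c") ∧ (gt i = "C" ∨ gt i = "c")) ∨
            ((gp i = "R" ∨ gp i = "r") ∧ (gt i = "R" ∨ gt i = "r"))) : Nat),
       c + (((l.countP (fun i => gp i = "C" ∨ gp i = "c" ∨ gp i = "R" ∨ gp i = "r") : Nat) : Int)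
            - ((l.countP (fun i =>
            ((gp i = "C" ∨ gp i = "c") ∧ (gt i = "C" ∨ gt i = "c")) ∨
            ((gp i = "R" ∨ gp i = "r") ∧ (gt i = "R" ∨ gt i = "r"))) : Nat) : Int)),
       d + (l.countP (fun i => (gp i = "N" ∨ gp i = "n") ∧ (gt i = "N" ∨ gt i = "n")) : Nat),
       e + (l.countP (fun i => (gp i = "N" ∨ gp i = "n") ∧ ¬(gt i = "N" ∨ gt i = "n")) : Nat)) := by
  induction l generalizing a b c d e with
  | nil => simp
  | cons x xs ih =>
    rw [List.foldl_cons, count_cr_step_eq, ih]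
    simp only [List.countP_cons, decide_eq_true_eq, Prod.mk.injEq]
    refine ⟨?_, ?_, ?_, ?_, ?_⟩ <;>
      · push_cast
        split_ifs <;> first | omega | tauto

-- ===== VERDICT (by name: the statement is the Claim_ definition above) =====
theorem count_cr_spec : Claim_equal_count_cr := by
  intro true_ pred _ _
  show count_cr true_ pred = count_cr_alt true_ pred
  unfold count_cr count_cr_alt
  rw [count_cr_fold_eq]
  simp only [zero_add]
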